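-- pv_equiv track=rewrite | github.com/cocoyolow/call_me_maybe | src/test.py | create_vocab_buckets
-- ===== SOURCE A (Python) =====
-- from typing import Dict, List, Tuple, Any, Optional
--
-- def create_vocab_buckets(vocab: Dict[str, int]) -> \
--                          Dict[str, List[Tuple[int, str]]]:
--     """
--     Create a dictionary of buckets based on the first character of the tokens.
--     """
--     buckets = {}
--     for t_str, t_id in vocab.items():
--         if not t_str:
--             continue
--         first_char = t_str[0]
--         if first_char not in buckets:
--             buckets[first_char] = []
--         buckets[first_char].append((t_id, t_str))
--     return buckets
-- ===== SOURCE B (Python) =====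
-- def create_vocab_buckets(vocab):
--     """
--     Create a dictionary of buckets based on the first character of the tokens.
--     Two-pass version: first collect the distinct first characters in order of
--     first appearance, then build each bucket with one comprehension.
--     """
--     order = []
--     for t_str in vocab:
--         if t_str and t_str[0] not in order:
--             order.append(t_str[0])
--     return {c: [(t_id, t_str) for t_str, t_id in vocab.items()
--                 if t_str and t_str[0] == c]
--             for c in order}
-- ===== Notes on version B (the rewrite author's own statement) =====
-- stated objective: alternative
-- what changed: Replaces A's single pass that mutates a dict of growing buckets by a two-pass scheme: first collect the distinct first characters in order of first appearance, then build each bucket with its own comprehension over the vocab.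
import Mathlib
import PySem

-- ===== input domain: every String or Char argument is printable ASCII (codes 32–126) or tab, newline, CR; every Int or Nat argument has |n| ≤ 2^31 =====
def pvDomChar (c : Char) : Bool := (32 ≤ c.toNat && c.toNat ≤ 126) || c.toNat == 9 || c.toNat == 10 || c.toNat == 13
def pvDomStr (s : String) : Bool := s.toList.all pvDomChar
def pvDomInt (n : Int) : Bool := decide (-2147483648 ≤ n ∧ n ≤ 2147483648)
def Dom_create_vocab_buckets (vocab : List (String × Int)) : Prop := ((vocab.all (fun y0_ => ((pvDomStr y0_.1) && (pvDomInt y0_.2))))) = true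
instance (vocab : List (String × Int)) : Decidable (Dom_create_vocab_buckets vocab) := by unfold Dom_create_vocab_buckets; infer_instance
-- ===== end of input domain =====

-- B is an alternative decomposition: a first pass records the distinct first characters
-- in order of first appearance, a second pass builds each bucket independently.

-- ===== PORT A =====
-- Python s[0] on a nonempty str yields a 1-character str: ported as String.singleton of the char (exact).
def create_vocab_buckets (vocab : List (String × Int)) : List (String × List (Int × String)) :=
  (vocab.foldl (fun buckets p =>
      if p.1 = "" then buckets
      else
        match PySem.Str.pyGet? p.1 0 with
        | none => buckets      -- unreachable: p.1 ≠ ""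
        | some ch =>
          let fc := String.singleton ch
          let buckets := if buckets.contains fc then buckets else buckets.insert fc []
          buckets.insert fc (buckets.getD fc [] ++ [(p.2, p.1)]))
    PySem.Dict.empty).items

-- ===== PORT B =====
def create_vocab_buckets_alt (vocab : List (String × Int)) : List (String × List (Int × String)) :=
  let order : List String :=
    vocab.foldl (fun ks p =>
        match PySem.Str.pyGet? p.1 0 with
        | none => ks          -- empty token: skipped
        | some ch =>
          let c := String.singleton ch
          if c ∈ ks then ks else ks ++ [c])
      []
  order.map (fun c =>
    (c, vocab.filterMap (fun p =>
          if (PySem.Str.pyGet? p.1 0).map String.singleton = some c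
          then some (p.2, p.1) else none)))

-- ===== PRECONDITION & SPEC =====
def Spec_create_vocab_buckets (vocab : List (String × Int)) (out : List (String × List (Int × String))) : Prop := out = create_vocab_buckets_alt vocab
instance (vocab : List (String × Int)) (out : List (String × List (Int × String))) : Decidable (Spec_create_vocab_buckets vocab out) := by unfold Spec_create_vocab_buckets; infer_instance

-- ===== CLAIM (what is proved, stated in full; the proofs are below) =====
def Claim_equal_create_vocab_buckets : Prop := ∀ (vocab : List (String × Int)), Dom_create_vocab_buckets vocab → Spec_create_vocab_buckets vocab (create_vocab_buckets vocab)

-- ===== LEMMAS AND PROOFS =====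

-- the (key, value) entries both programs distribute into buckets: an entry per nonempty token
def pvKey (p : String × Int) : Option String := (PySem.Str.pyGet? p.1 0).map String.singleton

def pvEnts (v : List (String × Int)) : List (String × (Int × String)) :=
  v.filterMap (fun p => (pvKey p).map (fun c => (c, (p.2, p.1))))

-- A's loop body is exactly Dict.modify at the entry's key
theorem pv_stepA_eq (d : PySem.Dict String (List (Int × String))) (fc : String)
    (val : Int × String) :
    (if d.contains fc then d else d.insert fc []).insert fc
      ((if d.contains fc then d else d.insert fc []).getD fc [] ++ [val]) =
      d.modify fc [] (· ++ [val]) := by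
  by_cases hc : d.contains fc = true
  · rw [if_pos hc]; rfl
  · simp only [Bool.not_eq_true] at hc
    rw [if_neg (by simp [hc])]
    rw [PySem.Dict.getD_insert_self, PySem.Dict.insert_insert_self]
    show _ = d.insert fc (d.getD fc [] ++ [val])
    rw [PySem.Dict.getD_of_not_contains _ _ hc]

-- the empty token indexes nothing
theorem pv_get_empty (p : String × Int) (h : p.1 = "") :
    PySem.Str.pyGet? p.1 0 = none := by rw [h]; rfl

theorem pv_key_none (p : String × Int) (h : p.1 = "") : pvKey p = none := by
  simp only [pvKey, pv_get_empty p h, Option.map_none]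

theorem pv_get_ne_none (p : String × Int) (hne : ¬ p.1 = "") :
    PySem.Str.pyGet? p.1 0 ≠ none := by
  intro h
  simp only [show (0 : Int) = ((0 : Nat) : Int) from rfl, PySem.Str.pyGet?_natCast] at h
  rw [List.getElem?_eq_none_iff] at h
  apply hne
  cases hl : p.1.toList with
  | cons a l => simp [hl] at h
  | nil => exact String.ext (by simp [hl])

-- A's whole fold is the canonical modify-fold over the entries
theorem pv_foldA (v : List (String × Int)) :
    ∀ d : PySem.Dict String (List (Int × String)),
    v.foldl (fun buckets p =>
        if p.1 = "" then buckets
        else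
          match PySem.Str.pyGet? p.1 0 with
          | none => buckets
          | some ch =>
            let fc := String.singleton ch
            let buckets := if buckets.contains fc then buckets else buckets.insert fc []
            buckets.insert fc (buckets.getD fc [] ++ [(p.2, p.1)])) d =
      (pvEnts v).foldl (fun d q => d.modify q.1 [] (· ++ [q.2])) d := by
  induction v with
  | nil => intro d; rfl
  | cons p v ih =>
    intro d
    by_cases hp : p.1 = ""
    · simp only [List.foldl_cons, if_pos hp, pvEnts, List.filterMap_cons,
        pv_key_none p hp]
      exact ih d
    · rcases Option.ne_none_iff_exists'.mp (pv_get_ne_none p hp) with ⟨ch, hch⟩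
      simp only [List.foldl_cons, if_neg hp, pvEnts, List.filterMap_cons, pvKey, hch]
      rw [pv_stepA_eq]
      exact ih _

-- B's first pass computes the ordered set of entry keys
theorem pv_order (v : List (String × Int)) :
    ∀ s : PySem.Set String,
    v.foldl (fun ks p =>
        match PySem.Str.pyGet? p.1 0 with
        | none => ks
        | some ch =>
          let c := String.singleton ch
          if c ∈ ks then ks else ks ++ [c]) s =
      PySem.Set.update s ((pvEnts v).map Prod.fst) := by
  induction v with
  | nil => intro s; rfl
  | cons p v ih =>
    intro s
    by_cases hp : p.1 = ""
    · have h0 : PySem.Str.pyGet? p.1 0 = none := pv_get_empty p hp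
      simp only [List.foldl_cons, h0, pvEnts, List.filterMap_cons, pv_key_none p hp]
      exact ih s
    · rcases Option.ne_none_iff_exists'.mp (pv_get_ne_none p hp) with ⟨ch, hch⟩
      simp only [List.foldl_cons, hch, pvEnts, List.filterMap_cons, pvKey]
      rw [← PySem.Set.add_eq_ite]
      exact ih _

-- B's comprehension for key c collects exactly the entries keyed c
theorem pv_collect (v : List (String × Int)) (c : String) :
    v.filterMap (fun p =>
        if (PySem.Str.pyGet? p.1 0).map String.singleton = some c
        then some (p.2, p.1) else none) =
      ((pvEnts v).filter (fun q => q.1 == c)).map (fun q => q.2) := by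
  induction v with
  | nil => rfl
  | cons p v ih =>
    by_cases hp : p.1 = ""
    · have h0 : pvKey p = none := pv_key_none p hp
      simp only [pvKey] at h0
      simp only [List.filterMap_cons, pvEnts, List.filterMap_cons, pvKey, h0,
        Option.map_none, reduceCtorEq, if_false]
      exact ih
    · rcases Option.ne_none_iff_exists'.mp (pv_get_ne_none p hp) with ⟨ch, hch⟩
      simp only [List.filterMap_cons, hch, pvEnts, pvKey]
      by_cases he : String.singleton ch = c
      · simp only [ih, pvEnts, pvKey]
        simp [he]
      · simp only [ih, pvEnts, pvKey]
        simp [he]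

-- ===== VERDICT (by name: the statement is the Claim_ definition above) =====
theorem create_vocab_buckets_spec : Claim_equal_create_vocab_buckets := by
  intro vocab _
  show create_vocab_buckets vocab = create_vocab_buckets_alt vocab
  unfold create_vocab_buckets create_vocab_buckets_alt
  rw [pv_foldA, pv_order]
  have hnd : ((pvEnts vocab).foldl (fun d q => d.modify q.1 [] (· ++ [q.2]))
      PySem.Dict.empty).keys.Nodup :=
    PySem.Dict.nodup_keys_foldl_modify_key (pvEnts vocab) Prod.fst [] (fun _ q l => l ++ [q.2])
      PySem.Dict.empty (by simp)
  rw [PySem.Dict.items_eq_map_keys _ hnd []]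
  rw [PySem.Dict.keys_foldl_modify_key (pvEnts vocab) Prod.fst [] (fun _ q l => l ++ [q.2])]
  apply List.map_congr_left
  intro c _
  rw [pv_collect]
  congr 1
  rw [PySem.Dict.getD_foldl_modify_append]
  simp [PySem.Dict.getD_empty]
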